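-- pv_equiv track=rewrite | github.com/VasanthSadhasivan/PostQuantum | Software Utilities/SIM_scripts/polycrypto_simulator.py | generate_gaussian
-- ===== SOURCE A (Python) =====
-- def generate_gaussian(uniform):
--     gaussian = []
--
--     for uniform_number in uniform:
--         if uniform_number < 1481:
--             gaussian_number = 10
--         elif uniform_number < 3781:
--             gaussian_number = 9
--         elif uniform_number < 8881:
--             gaussian_number = 8
--         elif uniform_number < 19221:
--             gaussian_number = 7
--         elif uniform_number < 38441:
--             gaussian_number = 6
--         elif uniform_number < 71101:
--             gaussian_number = 5
--         elif uniform_number < 121931: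
--             gaussian_number = 4
--         elif uniform_number < 194341:
--             gaussian_number = 3
--         elif uniform_number < 288751:
--             gaussian_number = 2
--         elif uniform_number < 401441:
--             gaussian_number = 1
--         elif uniform_number < 647641:
--             gaussian_number = 0
--         elif uniform_number < 760321:
--             gaussian_number = 1
--         elif uniform_number < 854741:
--             gaussian_number = 2
--         elif uniform_number < 927141:
--             gaussian_number = 3
--         elif uniform_number < 977981:
--             gaussian_number = 4
--         elif uniform_number < 1010641:
--             gaussian_number = 5
--         elif uniform_number < 1029851:
--             gaussian_number = 6
--         elif uniform_number < 1040201: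
--             gaussian_number = 7
--         elif uniform_number < 1045301:
--             gaussian_number = 8
--         elif uniform_number < 1047601:
--             gaussian_number = 9
--         else:
--             gaussian_number = 10
--         gaussian.append(gaussian_number)
--     return gaussian
-- ===== SOURCE B (Python) =====
-- THRESHOLDS = [1481, 3781, 8881, 19221, 38441, 71101, 121931, 194341, 288751,
--               401441, 647641, 760321, 854741, 927141, 977981, 1010641, 1029851,
--               1040201, 1045301, 1047601]
-- VALUES = [10, 9, 8, 7, 6, 5, 4, 3, 2, 1, 0, 1, 2, 3, 4, 5, 6, 7, 8, 9, 10]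
--
--
-- def generate_gaussian(uniform):
--     out = []
--     for u in uniform:
--         lo, hi = 0, len(THRESHOLDS)
--         while lo < hi:
--             mid = (lo + hi) // 2
--             if u < THRESHOLDS[mid]:
--                 hi = mid
--             else:
--                 lo = mid + 1
--         out.append(VALUES[lo])
--     return out
-- ===== Notes on version B (the rewrite author's own statement) =====
-- stated objective: alternative
-- what changed: Replaced the 21-branch elif ladder by a sorted threshold table plus a hand-written bisect_right binary search indexing into a values table.
import Mathlib
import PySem

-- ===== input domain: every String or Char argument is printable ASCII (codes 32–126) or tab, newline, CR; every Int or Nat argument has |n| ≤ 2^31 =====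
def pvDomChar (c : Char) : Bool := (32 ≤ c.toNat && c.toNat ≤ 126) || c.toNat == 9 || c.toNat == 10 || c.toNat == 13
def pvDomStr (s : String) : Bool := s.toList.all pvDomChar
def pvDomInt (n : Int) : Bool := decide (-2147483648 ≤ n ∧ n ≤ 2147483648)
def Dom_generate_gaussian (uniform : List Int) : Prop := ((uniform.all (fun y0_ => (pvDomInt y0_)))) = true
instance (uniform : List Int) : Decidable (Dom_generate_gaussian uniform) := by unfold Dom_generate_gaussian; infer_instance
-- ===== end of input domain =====

-- B replaces A's 21-branch elif ladder with a binary search (bisect_right) over a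
-- sorted threshold table indexing into a values table; same results, alternative structure.


-- ===== PORT A =====
-- the elif ladder, one branch per bucket, applied to each element in order
def pvLadder (u : Int) : Int :=
  if u < 1481 then 10
  else if u < 3781 then 9
  else if u < 8881 then 8
  else if u < 19221 then 7
  else if u < 38441 then 6
  else if u < 71101 then 5
  else if u < 121931 then 4
  else if u < 194341 then 3
  else if u < 288751 then 2
  else if u < 401441 then 1
  else if u < 647641 then 0
  else if u < 760321 then 1
  else if u < 854741 then 2
  else if u < 927141 then 3
  else if u < 977981 then 4
  else if u < 1010641 then 5
  else if u < 1029851 then 6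
  else if u < 1040201 then 7
  else if u < 1045301 then 8
  else if u < 1047601 then 9
  else 10

def generate_gaussian (uniform : List Int) : List Int :=
  uniform.foldl (fun gaussian u => gaussian ++ [pvLadder u]) []

-- ===== PORT B =====
def pvThresholds : List Int :=
  [1481, 3781, 8881, 19221, 38441, 71101, 121931, 194341, 288751,
   401441, 647641, 760321, 854741, 927141, 977981, 1010641, 1029851,
   1040201, 1045301, 1047601]

def pvValues : List Int := [10, 9, 8, 7, 6, 5, 4, 3, 2, 1, 0, 1, 2, 3, 4, 5, 6, 7, 8, 9, 10]

-- the while lo < hi binary-search loop of Source B (bisect_right)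
def pvBisect (u : Int) (lo hi : Nat) : Nat :=
  if lo < hi then
    let mid := (lo + hi) / 2
    if u < pvThresholds.getD mid 0 then pvBisect u lo mid
    else pvBisect u (mid + 1) hi
  else lo
termination_by hi - lo
decreasing_by all_goals omega

def generate_gaussian_alt (uniform : List Int) : List Int :=
  uniform.foldl (fun out u => out ++ [pvValues.getD (pvBisect u 0 pvThresholds.length) 0]) []

-- ===== PRECONDITION & SPEC =====
def Spec_generate_gaussian (uniform : List Int) (out : List Int) : Prop := out = generate_gaussian_alt uniform
instance (uniform : List Int) (out : List Int) : Decidable (Spec_generate_gaussian uniform out) := by unfold Spec_generate_gaussian; infer_instance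

-- ===== CLAIM (what is proved, stated in full; the proofs are below) =====
def Claim_equal_generate_gaussian : Prop := ∀ (uniform : List Int), Dom_generate_gaussian uniform → Spec_generate_gaussian uniform (generate_gaussian uniform)

-- ===== LEMMAS AND PROOFS =====
theorem pvBis_0_0 (u : Int) : pvBisect u 0 0 = 0 := by
  rw [pvBisect]; norm_num

theorem pvBis_1_1 (u : Int) : pvBisect u 1 1 = 1 := by
  rw [pvBisect]; norm_num

theorem pvBis_0_1 (u : Int) : pvBisect u 0 1 = if u < 1481 then pvBisect u 0 0 else pvBisect u 1 1 := by
  rw [pvBisect]; norm_num [pvThresholds]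

theorem pvBis_2_2 (u : Int) : pvBisect u 2 2 = 2 := by
  rw [pvBisect]; norm_num

theorem pvBis_0_2 (u : Int) : pvBisect u 0 2 = if u < 3781 then pvBisect u 0 1 else pvBisect u 2 2 := by
  rw [pvBisect]; norm_num [pvThresholds]

theorem pvBis_3_3 (u : Int) : pvBisect u 3 3 = 3 := by
  rw [pvBisect]; norm_num

theorem pvBis_4_4 (u : Int) : pvBisect u 4 4 = 4 := by
  rw [pvBisect]; norm_num

theorem pvBis_3_4 (u : Int) : pvBisect u 3 4 = if u < 19221 then pvBisect u 3 3 else pvBisect u 4 4 := by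
  rw [pvBisect]; norm_num [pvThresholds]

theorem pvBis_5_5 (u : Int) : pvBisect u 5 5 = 5 := by
  rw [pvBisect]; norm_num

theorem pvBis_3_5 (u : Int) : pvBisect u 3 5 = if u < 38441 then pvBisect u 3 4 else pvBisect u 5 5 := by
  rw [pvBisect]; norm_num [pvThresholds]

theorem pvBis_0_5 (u : Int) : pvBisect u 0 5 = if u < 8881 then pvBisect u 0 2 else pvBisect u 3 5 := by
  rw [pvBisect]; norm_num [pvThresholds]

theorem pvBis_6_6 (u : Int) : pvBisect u 6 6 = 6 := by
  rw [pvBisect]; norm_num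

theorem pvBis_7_7 (u : Int) : pvBisect u 7 7 = 7 := by
  rw [pvBisect]; norm_num

theorem pvBis_6_7 (u : Int) : pvBisect u 6 7 = if u < 121931 then pvBisect u 6 6 else pvBisect u 7 7 := by
  rw [pvBisect]; norm_num [pvThresholds]

theorem pvBis_8_8 (u : Int) : pvBisect u 8 8 = 8 := by
  rw [pvBisect]; norm_num

theorem pvBis_6_8 (u : Int) : pvBisect u 6 8 = if u < 194341 then pvBisect u 6 7 else pvBisect u 8 8 := by
  rw [pvBisect]; norm_num [pvThresholds]

theorem pvBis_9_9 (u : Int) : pvBisect u 9 9 = 9 := by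
  rw [pvBisect]; norm_num

theorem pvBis_10_10 (u : Int) : pvBisect u 10 10 = 10 := by
  rw [pvBisect]; norm_num

theorem pvBis_9_10 (u : Int) : pvBisect u 9 10 = if u < 401441 then pvBisect u 9 9 else pvBisect u 10 10 := by
  rw [pvBisect]; norm_num [pvThresholds]

theorem pvBis_6_10 (u : Int) : pvBisect u 6 10 = if u < 288751 then pvBisect u 6 8 else pvBisect u 9 10 := by
  rw [pvBisect]; norm_num [pvThresholds]

theorem pvBis_0_10 (u : Int) : pvBisect u 0 10 = if u < 71101 then pvBisect u 0 5 else pvBisect u 6 10 := by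
  rw [pvBisect]; norm_num [pvThresholds]

theorem pvBis_11_11 (u : Int) : pvBisect u 11 11 = 11 := by
  rw [pvBisect]; norm_num

theorem pvBis_12_12 (u : Int) : pvBisect u 12 12 = 12 := by
  rw [pvBisect]; norm_num

theorem pvBis_11_12 (u : Int) : pvBisect u 11 12 = if u < 760321 then pvBisect u 11 11 else pvBisect u 12 12 := by
  rw [pvBisect]; norm_num [pvThresholds]

theorem pvBis_13_13 (u : Int) : pvBisect u 13 13 = 13 := by
  rw [pvBisect]; norm_num

theorem pvBis_11_13 (u : Int) : pvBisect u 11 13 = if u < 854741 then pvBisect u 11 12 else pvBisect u 13 13 := by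
  rw [pvBisect]; norm_num [pvThresholds]

theorem pvBis_14_14 (u : Int) : pvBisect u 14 14 = 14 := by
  rw [pvBisect]; norm_num

theorem pvBis_15_15 (u : Int) : pvBisect u 15 15 = 15 := by
  rw [pvBisect]; norm_num

theorem pvBis_14_15 (u : Int) : pvBisect u 14 15 = if u < 977981 then pvBisect u 14 14 else pvBisect u 15 15 := by
  rw [pvBisect]; norm_num [pvThresholds]

theorem pvBis_11_15 (u : Int) : pvBisect u 11 15 = if u < 927141 then pvBisect u 11 13 else pvBisect u 14 15 := by
  rw [pvBisect]; norm_num [pvThresholds]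

theorem pvBis_16_16 (u : Int) : pvBisect u 16 16 = 16 := by
  rw [pvBisect]; norm_num

theorem pvBis_17_17 (u : Int) : pvBisect u 17 17 = 17 := by
  rw [pvBisect]; norm_num

theorem pvBis_16_17 (u : Int) : pvBisect u 16 17 = if u < 1029851 then pvBisect u 16 16 else pvBisect u 17 17 := by
  rw [pvBisect]; norm_num [pvThresholds]

theorem pvBis_18_18 (u : Int) : pvBisect u 18 18 = 18 := by
  rw [pvBisect]; norm_num

theorem pvBis_16_18 (u : Int) : pvBisect u 16 18 = if u < 1040201 then pvBisect u 16 17 else pvBisect u 18 18 := by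
  rw [pvBisect]; norm_num [pvThresholds]

theorem pvBis_19_19 (u : Int) : pvBisect u 19 19 = 19 := by
  rw [pvBisect]; norm_num

theorem pvBis_20_20 (u : Int) : pvBisect u 20 20 = 20 := by
  rw [pvBisect]; norm_num

theorem pvBis_19_20 (u : Int) : pvBisect u 19 20 = if u < 1047601 then pvBisect u 19 19 else pvBisect u 20 20 := by
  rw [pvBisect]; norm_num [pvThresholds]

theorem pvBis_16_20 (u : Int) : pvBisect u 16 20 = if u < 1045301 then pvBisect u 16 18 else pvBisect u 19 20 := by
  rw [pvBisect]; norm_num [pvThresholds]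

theorem pvBis_11_20 (u : Int) : pvBisect u 11 20 = if u < 1010641 then pvBisect u 11 15 else pvBisect u 16 20 := by
  rw [pvBisect]; norm_num [pvThresholds]

theorem pvBis_0_20 (u : Int) : pvBisect u 0 20 = if u < 647641 then pvBisect u 0 10 else pvBisect u 11 20 := by
  rw [pvBisect]; norm_num [pvThresholds]

theorem pvBucket_0 (u : Int) (h2 : u < 1481) :
    pvLadder u = pvValues.getD (pvBisect u 0 20) 0 := by
  unfold pvLadder
  rw [if_pos (show u < 1481 by omega)]
  rw [pvBis_0_20, if_pos (show u < 647641 by omega), pvBis_0_10, if_pos (show u < 71101 by omega), pvBis_0_5, if_pos (show u < 8881 by omega), pvBis_0_2, if_pos (show u < 3781 by omega), pvBis_0_1, if_pos (show u < 1481 by omega), pvBis_0_0]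
  rfl

theorem pvBucket_1 (u : Int) (h1 : 1481 ≤ u) (h2 : u < 3781) :
    pvLadder u = pvValues.getD (pvBisect u 0 20) 0 := by
  unfold pvLadder
  rw [if_neg (show ¬ u < 1481 by omega), if_pos (show u < 3781 by omega)]
  rw [pvBis_0_20, if_pos (show u < 647641 by omega), pvBis_0_10, if_pos (show u < 71101 by omega), pvBis_0_5, if_pos (show u < 8881 by omega), pvBis_0_2, if_pos (show u < 3781 by omega), pvBis_0_1, if_neg (show ¬ u < 1481 by omega), pvBis_1_1]
  rfl

theorem pvBucket_2 (u : Int) (h1 : 3781 ≤ u) (h2 : u < 8881) :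
    pvLadder u = pvValues.getD (pvBisect u 0 20) 0 := by
  unfold pvLadder
  rw [if_neg (show ¬ u < 1481 by omega), if_neg (show ¬ u < 3781 by omega), if_pos (show u < 8881 by omega)]
  rw [pvBis_0_20, if_pos (show u < 647641 by omega), pvBis_0_10, if_pos (show u < 71101 by omega), pvBis_0_5, if_pos (show u < 8881 by omega), pvBis_0_2, if_neg (show ¬ u < 3781 by omega), pvBis_2_2]
  rfl

theorem pvBucket_3 (u : Int) (h1 : 8881 ≤ u) (h2 : u < 19221) :
    pvLadder u = pvValues.getD (pvBisect u 0 20) 0 := by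
  unfold pvLadder
  rw [if_neg (show ¬ u < 1481 by omega), if_neg (show ¬ u < 3781 by omega), if_neg (show ¬ u < 8881 by omega), if_pos (show u < 19221 by omega)]
  rw [pvBis_0_20, if_pos (show u < 647641 by omega), pvBis_0_10, if_pos (show u < 71101 by omega), pvBis_0_5, if_neg (show ¬ u < 8881 by omega), pvBis_3_5, if_pos (show u < 38441 by omega), pvBis_3_4, if_pos (show u < 19221 by omega), pvBis_3_3]
  rfl

theorem pvBucket_4 (u : Int) (h1 : 19221 ≤ u) (h2 : u < 38441) :
    pvLadder u = pvValues.getD (pvBisect u 0 20) 0 := by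
  unfold pvLadder
  rw [if_neg (show ¬ u < 1481 by omega), if_neg (show ¬ u < 3781 by omega), if_neg (show ¬ u < 8881 by omega), if_neg (show ¬ u < 19221 by omega), if_pos (show u < 38441 by omega)]
  rw [pvBis_0_20, if_pos (show u < 647641 by omega), pvBis_0_10, if_pos (show u < 71101 by omega), pvBis_0_5, if_neg (show ¬ u < 8881 by omega), pvBis_3_5, if_pos (show u < 38441 by omega), pvBis_3_4, if_neg (show ¬ u < 19221 by omega), pvBis_4_4]
  rfl

theorem pvBucket_5 (u : Int) (h1 : 38441 ≤ u) (h2 : u < 71101) :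
    pvLadder u = pvValues.getD (pvBisect u 0 20) 0 := by
  unfold pvLadder
  rw [if_neg (show ¬ u < 1481 by omega), if_neg (show ¬ u < 3781 by omega), if_neg (show ¬ u < 8881 by omega), if_neg (show ¬ u < 19221 by omega), if_neg (show ¬ u < 38441 by omega), if_pos (show u < 71101 by omega)]
  rw [pvBis_0_20, if_pos (show u < 647641 by omega), pvBis_0_10, if_pos (show u < 71101 by omega), pvBis_0_5, if_neg (show ¬ u < 8881 by omega), pvBis_3_5, if_neg (show ¬ u < 38441 by omega), pvBis_5_5]
  rfl

theorem pvBucket_6 (u : Int) (h1 : 71101 ≤ u) (h2 : u < 121931) :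
    pvLadder u = pvValues.getD (pvBisect u 0 20) 0 := by
  unfold pvLadder
  rw [if_neg (show ¬ u < 1481 by omega), if_neg (show ¬ u < 3781 by omega), if_neg (show ¬ u < 8881 by omega), if_neg (show ¬ u < 19221 by omega), if_neg (show ¬ u < 38441 by omega), if_neg (show ¬ u < 71101 by omega), if_pos (show u < 121931 by omega)]
  rw [pvBis_0_20, if_pos (show u < 647641 by omega), pvBis_0_10, if_neg (show ¬ u < 71101 by omega), pvBis_6_10, if_pos (show u < 288751 by omega), pvBis_6_8, if_pos (show u < 194341 by omega), pvBis_6_7, if_pos (show u < 121931 by omega), pvBis_6_6]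
  rfl

theorem pvBucket_7 (u : Int) (h1 : 121931 ≤ u) (h2 : u < 194341) :
    pvLadder u = pvValues.getD (pvBisect u 0 20) 0 := by
  unfold pvLadder
  rw [if_neg (show ¬ u < 1481 by omega), if_neg (show ¬ u < 3781 by omega), if_neg (show ¬ u < 8881 by omega), if_neg (show ¬ u < 19221 by omega), if_neg (show ¬ u < 38441 by omega), if_neg (show ¬ u < 71101 by omega), if_neg (show ¬ u < 121931 by omega), if_pos (show u < 194341 by omega)]
  rw [pvBis_0_20, if_pos (show u < 647641 by omega), pvBis_0_10, if_neg (show ¬ u < 71101 by omega), pvBis_6_10, if_pos (show u < 288751 by omega), pvBis_6_8, if_pos (show u < 194341 by omega), pvBis_6_7, if_neg (show ¬ u < 121931 by omega), pvBis_7_7]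
  rfl

theorem pvBucket_8 (u : Int) (h1 : 194341 ≤ u) (h2 : u < 288751) :
    pvLadder u = pvValues.getD (pvBisect u 0 20) 0 := by
  unfold pvLadder
  rw [if_neg (show ¬ u < 1481 by omega), if_neg (show ¬ u < 3781 by omega), if_neg (show ¬ u < 8881 by omega), if_neg (show ¬ u < 19221 by omega), if_neg (show ¬ u < 38441 by omega), if_neg (show ¬ u < 71101 by omega), if_neg (show ¬ u < 121931 by omega), if_neg (show ¬ u < 194341 by omega), if_pos (show u < 288751 by omega)]
  rw [pvBis_0_20, if_pos (show u < 647641 by omega), pvBis_0_10, if_neg (show ¬ u < 71101 by omega), pvBis_6_10, if_pos (show u < 288751 by omega), pvBis_6_8, if_neg (show ¬ u < 194341 by omega), pvBis_8_8]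
  rfl

theorem pvBucket_9 (u : Int) (h1 : 288751 ≤ u) (h2 : u < 401441) :
    pvLadder u = pvValues.getD (pvBisect u 0 20) 0 := by
  unfold pvLadder
  rw [if_neg (show ¬ u < 1481 by omega), if_neg (show ¬ u < 3781 by omega), if_neg (show ¬ u < 8881 by omega), if_neg (show ¬ u < 19221 by omega), if_neg (show ¬ u < 38441 by omega), if_neg (show ¬ u < 71101 by omega), if_neg (show ¬ u < 121931 by omega), if_neg (show ¬ u < 194341 by omega), if_neg (show ¬ u < 288751 by omega), if_pos (show u < 401441 by omega)]
  rw [pvBis_0_20, if_pos (show u < 647641 by omega), pvBis_0_10, if_neg (show ¬ u < 71101 by omega), pvBis_6_10, if_neg (show ¬ u < 288751 by omega), pvBis_9_10, if_pos (show u < 401441 by omega), pvBis_9_9]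
  rfl

theorem pvBucket_10 (u : Int) (h1 : 401441 ≤ u) (h2 : u < 647641) :
    pvLadder u = pvValues.getD (pvBisect u 0 20) 0 := by
  unfold pvLadder
  rw [if_neg (show ¬ u < 1481 by omega), if_neg (show ¬ u < 3781 by omega), if_neg (show ¬ u < 8881 by omega), if_neg (show ¬ u < 19221 by omega), if_neg (show ¬ u < 38441 by omega), if_neg (show ¬ u < 71101 by omega), if_neg (show ¬ u < 121931 by omega), if_neg (show ¬ u < 194341 by omega), if_neg (show ¬ u < 288751 by omega), if_neg (show ¬ u < 401441 by omega), if_pos (show u < 647641 by omega)]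
  rw [pvBis_0_20, if_pos (show u < 647641 by omega), pvBis_0_10, if_neg (show ¬ u < 71101 by omega), pvBis_6_10, if_neg (show ¬ u < 288751 by omega), pvBis_9_10, if_neg (show ¬ u < 401441 by omega), pvBis_10_10]
  rfl

theorem pvBucket_11 (u : Int) (h1 : 647641 ≤ u) (h2 : u < 760321) :
    pvLadder u = pvValues.getD (pvBisect u 0 20) 0 := by
  unfold pvLadder
  rw [if_neg (show ¬ u < 1481 by omega), if_neg (show ¬ u < 3781 by omega), if_neg (show ¬ u < 8881 by omega), if_neg (show ¬ u < 19221 by omega), if_neg (show ¬ u < 38441 by omega), if_neg (show ¬ u < 71101 by omega), if_neg (show ¬ u < 121931 by omega), if_neg (show ¬ u < 194341 by omega), if_neg (show ¬ u < 288751 by omega), if_neg (show ¬ u < 401441 by omega), if_neg (show ¬ u < 647641 by omega), if_pos (show u < 760321 by omega)]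
  rw [pvBis_0_20, if_neg (show ¬ u < 647641 by omega), pvBis_11_20, if_pos (show u < 1010641 by omega), pvBis_11_15, if_pos (show u < 927141 by omega), pvBis_11_13, if_pos (show u < 854741 by omega), pvBis_11_12, if_pos (show u < 760321 by omega), pvBis_11_11]
  rfl

theorem pvBucket_12 (u : Int) (h1 : 760321 ≤ u) (h2 : u < 854741) :
    pvLadder u = pvValues.getD (pvBisect u 0 20) 0 := by
  unfold pvLadder
  rw [if_neg (show ¬ u < 1481 by omega), if_neg (show ¬ u < 3781 by omega), if_neg (show ¬ u < 8881 by omega), if_neg (show ¬ u < 19221 by omega), if_neg (show ¬ u < 38441 by omega), if_neg (show ¬ u < 71101 by omega), if_neg (show ¬ u < 121931 by omega), if_neg (show ¬ u < 194341 by omega), if_neg (show ¬ u < 288751 by omega), if_neg (show ¬ u < 401441 by omega), if_neg (show ¬ u < 647641 by omega), if_neg (show ¬ u < 760321 by omega), if_pos (show u < 854741 by omega)]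
  rw [pvBis_0_20, if_neg (show ¬ u < 647641 by omega), pvBis_11_20, if_pos (show u < 1010641 by omega), pvBis_11_15, if_pos (show u < 927141 by omega), pvBis_11_13, if_pos (show u < 854741 by omega), pvBis_11_12, if_neg (show ¬ u < 760321 by omega), pvBis_12_12]
  rfl

theorem pvBucket_13 (u : Int) (h1 : 854741 ≤ u) (h2 : u < 927141) :
    pvLadder u = pvValues.getD (pvBisect u 0 20) 0 := by
  unfold pvLadder
  rw [if_neg (show ¬ u < 1481 by omega), if_neg (show ¬ u < 3781 by omega), if_neg (show ¬ u < 8881 by omega), if_neg (show ¬ u < 19221 by omega), if_neg (show ¬ u < 38441 by omega), if_neg (show ¬ u < 71101 by omega), if_neg (show ¬ u < 121931 by omega), if_neg (show ¬ u < 194341 by omega), if_neg (show ¬ u < 288751 by omega), if_neg (show ¬ u < 401441 by omega), if_neg (show ¬ u < 647641 by omega), if_neg (show ¬ u < 760321 by omega), if_neg (show ¬ u < 854741 by omega), if_pos (show u < 927141 by omega)]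
  rw [pvBis_0_20, if_neg (show ¬ u < 647641 by omega), pvBis_11_20, if_pos (show u < 1010641 by omega), pvBis_11_15, if_pos (show u < 927141 by omega), pvBis_11_13, if_neg (show ¬ u < 854741 by omega), pvBis_13_13]
  rfl

theorem pvBucket_14 (u : Int) (h1 : 927141 ≤ u) (h2 : u < 977981) :
    pvLadder u = pvValues.getD (pvBisect u 0 20) 0 := by
  unfold pvLadder
  rw [if_neg (show ¬ u < 1481 by omega), if_neg (show ¬ u < 3781 by omega), if_neg (show ¬ u < 8881 by omega), if_neg (show ¬ u < 19221 by omega), if_neg (show ¬ u < 38441 by omega), if_neg (show ¬ u < 71101 by omega), if_neg (show ¬ u < 121931 by omega), if_neg (show ¬ u < 194341 by omega), if_neg (show ¬ u < 288751 by omega), if_neg (show ¬ u < 401441 by omega), if_neg (show ¬ u < 647641 by omega), if_neg (show ¬ u < 760321 by omega), if_neg (show ¬ u < 854741 by omega), if_neg (show ¬ u < 927141 by omega), if_pos (show u < 977981 by omega)]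
  rw [pvBis_0_20, if_neg (show ¬ u < 647641 by omega), pvBis_11_20, if_pos (show u < 1010641 by omega), pvBis_11_15, if_neg (show ¬ u < 927141 by omega), pvBis_14_15, if_pos (show u < 977981 by omega), pvBis_14_14]
  rfl

theorem pvBucket_15 (u : Int) (h1 : 977981 ≤ u) (h2 : u < 1010641) :
    pvLadder u = pvValues.getD (pvBisect u 0 20) 0 := by
  unfold pvLadder
  rw [if_neg (show ¬ u < 1481 by omega), if_neg (show ¬ u < 3781 by omega), if_neg (show ¬ u < 8881 by omega), if_neg (show ¬ u < 19221 by omega), if_neg (show ¬ u < 38441 by omega), if_neg (show ¬ u < 71101 by omega), if_neg (show ¬ u < 121931 by omega), if_neg (show ¬ u < 194341 by omega), if_neg (show ¬ u < 288751 by omega), if_neg (show ¬ u < 401441 by omega), if_neg (show ¬ u < 647641 by omega), if_neg (show ¬ u < 760321 by omega), if_neg (show ¬ u < 854741 by omega), if_neg (show ¬ u < 927141 by omega), if_neg (show ¬ u < 977981 by omega), if_pos (show u < 1010641 by omega)]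
  rw [pvBis_0_20, if_neg (show ¬ u < 647641 by omega), pvBis_11_20, if_pos (show u < 1010641 by omega), pvBis_11_15, if_neg (show ¬ u < 927141 by omega), pvBis_14_15, if_neg (show ¬ u < 977981 by omega), pvBis_15_15]
  rfl

theorem pvBucket_16 (u : Int) (h1 : 1010641 ≤ u) (h2 : u < 1029851) :
    pvLadder u = pvValues.getD (pvBisect u 0 20) 0 := by
  unfold pvLadder
  rw [if_neg (show ¬ u < 1481 by omega), if_neg (show ¬ u < 3781 by omega), if_neg (show ¬ u < 8881 by omega), if_neg (show ¬ u < 19221 by omega), if_neg (show ¬ u < 38441 by omega), if_neg (show ¬ u < 71101 by omega), if_neg (show ¬ u < 121931 by omega), if_neg (show ¬ u < 194341 by omega), if_neg (show ¬ u < 288751 by omega), if_neg (show ¬ u < 401441 by omega), if_neg (show ¬ u < 647641 by omega), if_neg (show ¬ u < 760321 by omega), if_neg (show ¬ u < 854741 by omega), if_neg (show ¬ u < 927141 by omega), if_neg (show ¬ u < 977981 by omega), if_neg (show ¬ u < 1010641 by omega), if_pos (show u < 1029851 by omega)]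
  rw [pvBis_0_20, if_neg (show ¬ u < 647641 by omega), pvBis_11_20, if_neg (show ¬ u < 1010641 by omega), pvBis_16_20, if_pos (show u < 1045301 by omega), pvBis_16_18, if_pos (show u < 1040201 by omega), pvBis_16_17, if_pos (show u < 1029851 by omega), pvBis_16_16]
  rfl

theorem pvBucket_17 (u : Int) (h1 : 1029851 ≤ u) (h2 : u < 1040201) :
    pvLadder u = pvValues.getD (pvBisect u 0 20) 0 := by
  unfold pvLadder
  rw [if_neg (show ¬ u < 1481 by omega), if_neg (show ¬ u < 3781 by omega), if_neg (show ¬ u < 8881 by omega), if_neg (show ¬ u < 19221 by omega), if_neg (show ¬ u < 38441 by omega), if_neg (show ¬ u < 71101 by omega), if_neg (show ¬ u < 121931 by omega), if_neg (show ¬ u < 194341 by omega), if_neg (show ¬ u < 288751 by omega), if_neg (show ¬ u < 401441 by omega), if_neg (show ¬ u < 647641 by omega), if_neg (show ¬ u < 760321 by omega), if_neg (show ¬ u < 854741 by omega), if_neg (show ¬ u < 927141 by omega), if_neg (show ¬ u < 977981 by omega), if_neg (show ¬ u < 1010641 by omega), if_neg (show ¬ u < 1029851 by omega), if_pos (show u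 < 1040201 by omega)]
  rw [pvBis_0_20, if_neg (show ¬ u < 647641 by omega), pvBis_11_20, if_neg (show ¬ u < 1010641 by omega), pvBis_16_20, if_pos (show u < 1045301 by omega), pvBis_16_18, if_pos (show u < 1040201 by omega), pvBis_16_17, if_neg (show ¬ u < 1029851 by omega), pvBis_17_17]
  rfl

theorem pvBucket_18 (u : Int) (h1 : 1040201 ≤ u) (h2 : u < 1045301) :
    pvLadder u = pvValues.getD (pvBisect u 0 20) 0 := by
  unfold pvLadder
  rw [if_neg (show ¬ u < 1481 by omega), if_neg (show ¬ u < 3781 by omega), if_neg (show ¬ u < 8881 by omega), if_neg (show ¬ u < 19221 by omega), if_neg (show ¬ u < 38441 by omega), if_neg (show ¬ u < 71101 by omega), if_neg (show ¬ u < 121931 by omega), if_neg (show ¬ u < 194341 by omega), if_neg (show ¬ u < 288751 by omega), if_neg (show ¬ u < 401441 by omega), if_neg (show ¬ u < 647641 by omega), if_neg (show ¬ u < 760321 by omega), if_neg (show ¬ u < 854741 by omega), if_neg (show ¬ u < 927141 by omega), if_neg (show ¬ u < 977981 by omega), if_neg (show ¬ u < 1010641 by omega), if_neg (show ¬ u <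 1029851 by omega), if_neg (show ¬ u < 1040201 by omega), if_pos (show u < 1045301 by omega)]
  rw [pvBis_0_20, if_neg (show ¬ u < 647641 by omega), pvBis_11_20, if_neg (show ¬ u < 1010641 by omega), pvBis_16_20, if_pos (show u < 1045301 by omega), pvBis_16_18, if_neg (show ¬ u < 1040201 by omega), pvBis_18_18]
  rfl

theorem pvBucket_19 (u : Int) (h1 : 1045301 ≤ u) (h2 : u < 1047601) :
    pvLadder u = pvValues.getD (pvBisect u 0 20) 0 := by
  unfold pvLadder
  rw [if_neg (show ¬ u < 1481 by omega), if_neg (show ¬ u < 3781 by omega), if_neg (show ¬ u < 8881 by omega), if_neg (show ¬ u < 19221 by omega), if_neg (show ¬ u < 38441 by omega), if_neg (show ¬ u < 71101 by omega), if_neg (show ¬ u < 121931 by omega), if_neg (show ¬ u < 194341 by omega), if_neg (show ¬ u < 288751 by omega), if_neg (show ¬ u < 401441 by omega), if_neg (show ¬ u < 647641 by omega), if_neg (show ¬ u < 760321 by omega), if_neg (show ¬ u < 854741 by omega), if_neg (show ¬ u < 927141 by omega), if_neg (show ¬ u < 977981 by omega), if_neg (show ¬ u < 1010641 by omega), if_neg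 (show ¬ u < 1029851 by omega), if_neg (show ¬ u < 1040201 by omega), if_neg (show ¬ u < 1045301 by omega), if_pos (show u < 1047601 by omega)]
  rw [pvBis_0_20, if_neg (show ¬ u < 647641 by omega), pvBis_11_20, if_neg (show ¬ u < 1010641 by omega), pvBis_16_20, if_neg (show ¬ u < 1045301 by omega), pvBis_19_20, if_pos (show u < 1047601 by omega), pvBis_19_19]
  rfl

theorem pvBucket_20 (u : Int) (h1 : 1047601 ≤ u) :
    pvLadder u = pvValues.getD (pvBisect u 0 20) 0 := by
  unfold pvLadder
  rw [if_neg (show ¬ u < 1481 by omega), if_neg (show ¬ u < 3781 by omega), if_neg (show ¬ u < 8881 by omega), if_neg (show ¬ u < 19221 by omega), if_neg (show ¬ u < 38441 by omega), if_neg (show ¬ u < 71101 by omega), if_neg (show ¬ u < 121931 by omega), if_neg (show ¬ u < 194341 by omega), if_neg (show ¬ u < 288751 by omega), if_neg (show ¬ u < 401441 by omega), if_neg (show ¬ u < 647641 by omega), if_neg (show ¬ u < 760321 by omega), if_neg (show ¬ u < 854741 by omega), if_neg (show ¬ u < 927141 by omega), if_neg (show ¬ u < 977981 by omega), if_neg (show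 ¬ u < 1010641 by omega), if_neg (show ¬ u < 1029851 by omega), if_neg (show ¬ u < 1040201 by omega), if_neg (show ¬ u < 1045301 by omega), if_neg (show ¬ u < 1047601 by omega)]
  rw [pvBis_0_20, if_neg (show ¬ u < 647641 by omega), pvBis_11_20, if_neg (show ¬ u < 1010641 by omega), pvBis_16_20, if_neg (show ¬ u < 1045301 by omega), pvBis_19_20, if_neg (show ¬ u < 1047601 by omega), pvBis_20_20]
  rfl

theorem pvStep_eq (u : Int) :
    pvLadder u = pvValues.getD (pvBisect u 0 pvThresholds.length) 0 := by
  show pvLadder u = pvValues.getD (pvBisect u 0 20) 0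
  by_cases hc0 : u < 1481
  · exact pvBucket_0 u hc0
  by_cases hc1 : u < 3781
  · exact pvBucket_1 u (by omega) hc1
  by_cases hc2 : u < 8881
  · exact pvBucket_2 u (by omega) hc2
  by_cases hc3 : u < 19221
  · exact pvBucket_3 u (by omega) hc3
  by_cases hc4 : u < 38441
  · exact pvBucket_4 u (by omega) hc4
  by_cases hc5 : u < 71101
  · exact pvBucket_5 u (by omega) hc5
  by_cases hc6 : u < 121931
  · exact pvBucket_6 u (by omega) hc6
  by_cases hc7 : u < 194341
  · exact pvBucket_7 u (by omega) hc7
  by_cases hc8 : u < 288751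
  · exact pvBucket_8 u (by omega) hc8
  by_cases hc9 : u < 401441
  · exact pvBucket_9 u (by omega) hc9
  by_cases hc10 : u < 647641
  · exact pvBucket_10 u (by omega) hc10
  by_cases hc11 : u < 760321
  · exact pvBucket_11 u (by omega) hc11
  by_cases hc12 : u < 854741
  · exact pvBucket_12 u (by omega) hc12
  by_cases hc13 : u < 927141
  · exact pvBucket_13 u (by omega) hc13
  by_cases hc14 : u < 977981
  · exact pvBucket_14 u (by omega) hc14
  by_cases hc15 : u < 1010641
  · exact pvBucket_15 u (by omega) hc15
  by_cases hc16 : u < 1029851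
  · exact pvBucket_16 u (by omega) hc16
  by_cases hc17 : u < 1040201
  · exact pvBucket_17 u (by omega) hc17
  by_cases hc18 : u < 1045301
  · exact pvBucket_18 u (by omega) hc18
  by_cases hc19 : u < 1047601
  · exact pvBucket_19 u (by omega) hc19
  exact pvBucket_20 u (by omega)

-- ===== VERDICT =====
theorem generate_gaussian_spec : Claim_equal_generate_gaussian := by
  intro uniform _
  show generate_gaussian uniform = generate_gaussian_alt uniform
  unfold generate_gaussian generate_gaussian_alt
  simp only [pvStep_eq]
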